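-- pv_equiv track=rewrite | github.com/PeterKaras/Python | #2 Another python codes - messy/Najacsie cislo.py | max_cislo
-- ===== SOURCE A (Python) =====
-- def max_cislo(y):
--     cisla = []
--     for x in y:
--         if x.isdigit():
--             x = int(x)
--             cisla.append(x)
--     cisla.sort()
--     return("Naväčšie číslo je : " + str(cisla[-1]))
-- ===== SOURCE B (Python) =====
-- def max_cislo(y):
--     return "Naväčšie číslo je : " + str(max(int(x) for x in y if x.isdigit()))
-- ===== Notes on version B (the rewrite author's own statement) =====
-- stated objective: idiomatic
-- what changed: Replaces building a list of digits and sorting it to take the last element with max() over a generator (a single running-maximum pass); Pre_ excludes strings with no digit character, where both implementations raise (A IndexError, B ValueError).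
import Mathlib
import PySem

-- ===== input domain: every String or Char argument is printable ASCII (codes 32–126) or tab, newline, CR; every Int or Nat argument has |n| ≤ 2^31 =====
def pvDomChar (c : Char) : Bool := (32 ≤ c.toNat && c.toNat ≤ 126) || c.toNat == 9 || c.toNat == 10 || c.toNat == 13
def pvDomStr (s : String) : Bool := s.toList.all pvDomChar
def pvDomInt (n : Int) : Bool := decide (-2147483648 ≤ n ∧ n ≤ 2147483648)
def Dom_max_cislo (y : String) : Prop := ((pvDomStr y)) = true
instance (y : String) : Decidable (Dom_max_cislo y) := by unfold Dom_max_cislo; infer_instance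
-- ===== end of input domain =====

-- B replaces A's build-list / sort / take-last with max() over a generator of the digit values (idiomatic; no speed claim).

-- ===== PORT A =====
-- int(x) for a single char passing isdigit on the ASCII domain: exact via PySem.Int.ofStr?;
-- .getD 0 is never the default branch under Dom (isdigit ⇒ parse succeeds).
def pvDigitVal (x : Char) : Int := (PySem.Int.ofStr? (String.ofList [x])).getD 0

def max_cislo (y : String) : String :=
  let cisla : List Int := y.toList.foldl
    (fun acc x => if PySem.Chars.isdigit x then acc ++ [pvDigitVal x] else acc) []
  let sorted := PySem.List.sorted cisla (fun v => v) false
  -- cisla[-1]: IndexError when empty — excluded by Pre_; pyGetD exact under Pre_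
  "Naväčšie číslo je : " ++ PySem.Int.toStr (PySem.List.pyGetD sorted (-1) 0)

-- ===== PORT B =====
-- max(int(x) for x in y if x.isdigit()) → PySem.List.max? over the filtered/mapped values;
-- none means Python's max raised ValueError (no digit) — excluded by Pre_.
def max_cislo_alt (y : String) : String :=
  match PySem.List.max? ((y.toList.filter PySem.Chars.isdigit).map pvDigitVal) (fun v => v) with
  | some m => "Naväčšie číslo je : " ++ PySem.Int.toStr m
  | none => ""

-- ===== PRECONDITION & SPEC =====
-- Pre_ excludes strings with no digit character: there both programs raise (A IndexError on cisla[-1], B ValueError from max()).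
def Pre_max_cislo (y : String) : Prop := (y.toList.any PySem.Chars.isdigit) = true
instance (y : String) : Decidable (Pre_max_cislo y) := by unfold Pre_max_cislo; infer_instance
def pvWitness_max_cislo : String := "a7b2"

def Spec_max_cislo (y : String) (out : String) : Prop := out = max_cislo_alt y
instance (y : String) (out : String) : Decidable (Spec_max_cislo y out) := by unfold Spec_max_cislo; infer_instance

-- ===== CLAIM (what is proved, stated in full; the proofs are below) =====
def Claim_equal_max_cislo : Prop := ∀ (y : String), Dom_max_cislo y → Pre_max_cislo y → Spec_max_cislo y (max_cislo y)

-- ===== LEMMAS AND PROOFS =====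

-- A's accumulating loop builds exactly the filtered-mapped digit list.
theorem afold_eq (cs : List Char) (acc : List Int) :
    cs.foldl (fun acc x => if PySem.Chars.isdigit x then acc ++ [pvDigitVal x] else acc) acc
      = acc ++ (cs.filter PySem.Chars.isdigit).map pvDigitVal := by
  induction cs generalizing acc with
  | nil => simp
  | cons c t ih =>
    by_cases h : PySem.Chars.isdigit c <;> simp [h, ih]

-- max characterisation: running max is a member and an upper bound
theorem foldl_max_mem (a : Int) (t : List Int) : t.foldl max a ∈ a :: t := by
  induction t generalizing a with
  | nil => simp
  | cons v s ih =>
    have h := ih (max a v)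
    simp only [List.foldl]
    rcases List.mem_cons.mp h with h | h
    · rw [h]
      rcases max_choice a v with hm | hm <;> simp [hm]
    · simp [h]

theorem foldl_max_ub (a : Int) (t : List Int) : ∀ x ∈ a :: t, x ≤ t.foldl max a := by
  induction t generalizing a with
  | nil => intro x hx; simp at hx; simp [hx]
  | cons v s ih =>
    intro x hx
    rcases List.mem_cons.mp hx with rfl | hx
    · have := ih (max x v) (max x v) (by simp)
      calc x ≤ max x v := le_max_left _ _
        _ ≤ _ := this
    · rcases List.mem_cons.mp hx with rfl | hx
      · have := ih (max a x) (max a x) (by simp)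
        calc x ≤ max a x := le_max_right _ _
          _ ≤ _ := this
      · exact ih (max a v) x (List.mem_cons_of_mem _ hx)

-- last element of a Pairwise-(≤) nonempty list is an upper bound
theorem pairwise_le_getLast (l : List Int) (h : l ≠ []) (hp : l.Pairwise (· ≤ ·)) :
    ∀ x ∈ l, x ≤ l.getLast h := by
  induction l with
  | nil => simp at h
  | cons a t ih =>
    intro x hx
    rcases List.mem_cons.mp hx with rfl | hx
    · rcases t.eq_nil_or_concat with rfl | ⟨s, b, rfl⟩
      · simp
      · have hb : b ∈ s.concat b := by simp
        have hxb : x ≤ b := (List.pairwise_cons.mp hp).1 b hb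
        have hne' : s.concat b ≠ [] := by simp
        rw [List.getLast_cons hne']
        simpa [List.concat_eq_append, List.getLast_append] using hxb
    · have ht : t ≠ [] := by rintro rfl; simp at hx
      have := ih ht (List.pairwise_cons.mp hp).2 x hx
      simpa [List.getLast_cons ht] using this

-- the last of the sorted digit list equals the running max
theorem sorted_last_eq_max (a : Int) (t : List Int) :
    PySem.List.pyGetD (PySem.List.sorted (a :: t) (fun v => v) false) (-1) 0 = t.foldl max a := by
  set s := PySem.List.sorted (a :: t) (fun v => v) false with hs
  have hperm : s.Perm (a :: t) := PySem.List.sorted_perm _ _ _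
  have hne : s ≠ [] := by
    intro h0
    have := hperm.length_eq
    simp [h0] at this
  have hp : s.Pairwise (· ≤ ·) := by
    simpa using PySem.List.sorted_pairwise (xs := a :: t) (key := fun v => v)
  rw [PySem.List.pyGetD_neg_one (h := hne)]
  set L := s.getLast hne with hL
  have hLmem : L ∈ a :: t := hperm.mem_iff.mp (List.getLast_mem hne)
  have hMmem : t.foldl max a ∈ s := hperm.mem_iff.mpr (foldl_max_mem a t)
  exact le_antisymm (foldl_max_ub a t L hLmem) (pairwise_le_getLast s hne hp _ hMmem)

-- ===== VERDICT (by name: the statement is the Claim_ definition above) =====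
theorem max_cislo_spec : Claim_equal_max_cislo := by
  intro y _ hpre
  unfold Spec_max_cislo max_cislo max_cislo_alt
  rw [afold_eq]
  simp only [List.nil_append]
  have hne : (y.toList.filter PySem.Chars.isdigit).map pvDigitVal ≠ [] := by
    unfold Pre_max_cislo at hpre
    rcases List.any_eq_true.mp hpre with ⟨c, hc, hd⟩
    simp only [ne_eq, List.map_eq_nil_iff, List.filter_eq_nil_iff]
    intro h
    exact absurd hd (by simpa using h c hc)
  rcases List.exists_cons_of_ne_nil hne with ⟨a, t, heq⟩
  rw [heq, PySem.List.max?_id_cons, sorted_last_eq_max]
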